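-- pv_equiv track=rewrite | github.com/darshlakhani24/cs50-python-portfolio | psets/week2/plates.py | numbers_at_end
-- ===== SOURCE A (Python) =====
-- def numbers_at_end(s):
--     number_started = False
--     for i, char in enumerate(s):
--         if char.isdigit():
--             if not number_started:
--                 if char == '0':
--                     return False
--                 number_started = True
--         elif number_started:
--             return False
--     return True
-- ===== SOURCE B (Python) =====
-- def numbers_at_end(s):
--     for i, ch in enumerate(s):
--         if ch.isdigit():
--             return ch != '0' and s[i:].isdigit()
--     return True
-- ===== Notes on version B (the rewrite author's own statement) =====
-- stated objective: simpler
-- what changed: Replaces A's stateful single pass with a flag by a two-phase decomposition: find the first digit, reject a leading zero, and bulk-validate the whole suffix with str.isdigit.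
import Mathlib
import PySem

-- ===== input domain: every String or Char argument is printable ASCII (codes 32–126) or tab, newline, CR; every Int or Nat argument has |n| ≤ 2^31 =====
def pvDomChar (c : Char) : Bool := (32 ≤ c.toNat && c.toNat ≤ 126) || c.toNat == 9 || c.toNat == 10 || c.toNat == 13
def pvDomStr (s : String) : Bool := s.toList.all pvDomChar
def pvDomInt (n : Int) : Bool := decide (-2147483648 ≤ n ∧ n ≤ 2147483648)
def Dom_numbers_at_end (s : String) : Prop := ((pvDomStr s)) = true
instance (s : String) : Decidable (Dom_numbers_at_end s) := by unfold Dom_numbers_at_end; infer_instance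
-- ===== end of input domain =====

-- B replaces A's stateful flag-carrying scan by a two-phase decomposition: find the first digit, then bulk-check the suffix with str.isdigit.


-- ===== PORT A =====
-- the for-loop with the number_started flag, as structural recursion over the characters
def numbersAtEndLoopA : List Char → Bool → Bool
  | [], _ => true
  | c :: rest, started =>
    if PySem.Chars.isdigit c then
      if !started then
        if c == '0' then false else numbersAtEndLoopA rest true
      else numbersAtEndLoopA rest started
    else if started then false
    else numbersAtEndLoopA rest started

def numbers_at_end (s : String) : Bool := numbersAtEndLoopA s.toList false

-- ===== PORT B =====
-- find the first digit; at it, reject '0' and bulk-validate the suffix s[i:] with isdigit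
def numbersAtEndLoopB : List Char → Bool
  | [] => true
  | c :: rest =>
    if PySem.Chars.isdigit c then (c != '0') && PySem.Chars.strIsdigit (c :: rest)
    else numbersAtEndLoopB rest

def numbers_at_end_alt (s : String) : Bool := numbersAtEndLoopB s.toList

-- ===== PRECONDITION & SPEC =====
def Spec_numbers_at_end (s : String) (out : Bool) : Prop := out = numbers_at_end_alt s
instance (s : String) (out : Bool) : Decidable (Spec_numbers_at_end s out) := by unfold Spec_numbers_at_end; infer_instance

-- ===== CLAIM (what is proved, stated in full; the proofs are below) =====
def Claim_equal_numbers_at_end : Prop := ∀ (s : String), Dom_numbers_at_end s → Spec_numbers_at_end s (numbers_at_end s)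

-- ===== LEMMAS AND PROOFS =====
-- once the flag is set, A's loop just checks that every remaining char is a digit
theorem loopA_true (cs : List Char) :
    numbersAtEndLoopA cs true = cs.all PySem.Chars.isdigit := by
  induction cs with
  | nil => rfl
  | cons c rest ih =>
    simp only [numbersAtEndLoopA, List.all_cons]
    by_cases h : PySem.Chars.isdigit c = true <;> simp [h, ih]

theorem loopA_eq_loopB (cs : List Char) :
    numbersAtEndLoopA cs false = numbersAtEndLoopB cs := by
  induction cs with
  | nil => rfl
  | cons c rest ih =>
    simp only [numbersAtEndLoopA, numbersAtEndLoopB]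
    by_cases hd : PySem.Chars.isdigit c = true
    · by_cases h0 : c = '0'
      · simp [h0, show PySem.Chars.isdigit '0' = true by decide]
      · simp [hd, h0, loopA_true, PySem.Chars.strIsdigit]
    · simp [hd, ih]

-- ===== VERDICT (by name: the statement is the Claim_ definition above) =====
theorem numbers_at_end_spec : Claim_equal_numbers_at_end := by
  intro s _
  unfold Spec_numbers_at_end numbers_at_end numbers_at_end_alt
  exact loopA_eq_loopB s.toList
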